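-- pv_equiv track=rewrite | github.com/songzy12/CodeForces | Codeforces Round #727/C.py | compute_reduction
-- ===== SOURCE A (Python) =====
-- def consume_quota(diff, x):
--     if diff % x == 0:
--         return diff // x - 1
--     return diff // x
--
-- def compute_reduction(diffs, k, x):
--     count = 0
--     usage = 0
--     for diff in diffs:
--         if consume_quota(diff, x) + usage <= k:
--             usage += consume_quota(diff, x)
--             count += 1
--         else:
--             break
--     return count
-- ===== SOURCE B (Python) =====
-- from itertools import accumulate
-- from bisect import bisect_right
--
-- def consume_quota(diff, x):
--     if diff % x == 0:
--         return diff // x - 1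
--     return diff // x
--
-- def compute_reduction(diffs, k, x):
--     # Running maxima of the cumulative quota sums form a nondecreasing array,
--     # so the break point can be found by binary search instead of a linear scan.
--     peaks = list(accumulate(accumulate(consume_quota(d, x) for d in diffs), max))
--     return bisect_right(peaks, k)
-- ===== Notes on version B (the rewrite author's own statement) =====
-- stated objective: alternative
-- what changed: B builds the running-maximum array of the cumulative quota sums (which is monotone nondecreasing) and locates the answer by binary search (bisect_right) on that array, instead of A's fused early-break linear accumulator loop.
import Mathlib
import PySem

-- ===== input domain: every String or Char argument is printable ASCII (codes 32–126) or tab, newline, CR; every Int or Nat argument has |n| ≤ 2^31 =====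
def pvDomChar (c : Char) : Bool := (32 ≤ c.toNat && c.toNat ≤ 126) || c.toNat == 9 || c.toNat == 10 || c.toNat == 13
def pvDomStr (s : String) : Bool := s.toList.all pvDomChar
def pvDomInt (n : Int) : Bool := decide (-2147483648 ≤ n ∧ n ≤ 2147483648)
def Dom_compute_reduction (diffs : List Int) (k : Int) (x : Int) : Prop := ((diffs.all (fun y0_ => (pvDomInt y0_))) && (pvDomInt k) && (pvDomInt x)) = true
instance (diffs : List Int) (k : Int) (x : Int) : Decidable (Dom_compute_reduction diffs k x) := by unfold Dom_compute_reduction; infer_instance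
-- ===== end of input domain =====

-- B replaces A's fused early-break accumulator loop by the running-maximum array of the
-- cumulative quota sums followed by a bisect_right binary search (objective: alternative).

-- ===== PORT A =====
def consume_quota (diff : Int) (x : Int) : Int :=
  if PySem.Int.mod diff x = 0 then PySem.Int.floordiv diff x - 1
  else PySem.Int.floordiv diff x

-- the for-loop with break, carrying (usage, count)
def pvLoopA (k x : Int) : List Int → Int → Int → Int
  | [], _, count => count
  | d :: ds, usage, count =>
    if consume_quota d x + usage ≤ k then pvLoopA k x ds (usage + consume_quota d x) (count + 1)
    else count

def compute_reduction (diffs : List Int) (k : Int) (x : Int) : Int :=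
  pvLoopA k x diffs 0 0

-- ===== PORT B =====
-- itertools.accumulate with '+': running sums, carrying the partial sum s
def pvAccum : List Int → Int → List Int
  | [], _ => []
  | a :: as, s => (s + a) :: pvAccum as (s + a)

-- itertools.accumulate with 'max': running maxima (m is the maximum so far)
def pvRunMaxAux (m : Int) : List Int → List Int
  | [] => []
  | a :: as => (max m a) :: pvRunMaxAux (max m a) as

def pvRunMax : List Int → List Int
  | [] => []
  | a :: as => a :: pvRunMaxAux a as

-- bisect.bisect_right(a, key) on [lo, hi): classic lo/hi binary search
def pvBisect (a : List Int) (key : Int) (lo hi : Nat) : Nat :=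
  if _h : lo < hi then
    let mid := (lo + hi) / 2
    if key < a.getD mid 0 then pvBisect a key lo mid
    else pvBisect a key (mid + 1) hi
  else lo
termination_by hi - lo
decreasing_by all_goals omega

def compute_reduction_alt (diffs : List Int) (k : Int) (x : Int) : Int :=
  let peaks := pvRunMax (pvAccum (diffs.map fun d => consume_quota d x) 0)
  (pvBisect peaks k 0 peaks.length : Int)

-- ===== PRECONDITION & SPEC =====
-- Pre_ excludes exactly the inputs where Python A raises ZeroDivisionError: x = 0 with a non-empty list.
def Pre_compute_reduction (diffs : List Int) (k : Int) (x : Int) : Prop := diffs = [] ∨ x ≠ 0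
instance (diffs : List Int) (k : Int) (x : Int) : Decidable (Pre_compute_reduction diffs k x) := by unfold Pre_compute_reduction; infer_instance
def pvWitness_compute_reduction : List Int × Int × Int := ([5, 3, 9], 4, 2)
def Spec_compute_reduction (diffs : List Int) (k : Int) (x : Int) (out : Int) : Prop := out = compute_reduction_alt diffs k x
instance (diffs : List Int) (k : Int) (x : Int) (out : Int) : Decidable (Spec_compute_reduction diffs k x out) := by unfold Spec_compute_reduction; infer_instance

-- ===== CLAIM (what is proved, stated in full; the proofs are below) =====
def Claim_equal_compute_reduction : Prop := ∀ (diffs : List Int) (k : Int) (x : Int), Dom_compute_reduction diffs k x → Pre_compute_reduction diffs k x → Spec_compute_reduction diffs k x (compute_reduction diffs k x)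

-- ===== LEMMAS AND PROOFS =====

-- proof-side description of the answer: first index of sums whose value exceeds k
def pvNIdx (k : Int) : List Int → Nat
  | [] => 0
  | s :: ss => if k < s then 0 else 1 + pvNIdx k ss

theorem pvLoopA_eq (k x : Int) (ds : List Int) (usage count : Int) :
    pvLoopA k x ds usage count = count + (pvNIdx k (pvAccum (ds.map fun d => consume_quota d x) usage) : Int) := by
  induction ds generalizing usage count with
  | nil => simp [pvLoopA, pvAccum, pvNIdx]
  | cons d ds ih =>
    simp only [pvLoopA, List.map, pvAccum, pvNIdx]
    by_cases h : consume_quota d x + usage ≤ k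
    · rw [if_pos h, if_neg (by omega), ih]
      push_cast; ring
    · rw [if_neg h, if_pos (by omega)]
      simp

theorem pvNIdx_le_length (k : Int) (ss : List Int) : pvNIdx k ss ≤ ss.length := by
  induction ss with
  | nil => simp [pvNIdx]
  | cons s ss ih => simp only [pvNIdx, List.length_cons]; split_ifs <;> omega

theorem pvRunMaxAux_length (m : Int) (ss : List Int) : (pvRunMaxAux m ss).length = ss.length := by
  induction ss generalizing m with
  | nil => rfl
  | cons s ss ih => simp [pvRunMaxAux, ih]

theorem pvRunMax_length (ss : List Int) : (pvRunMax ss).length = ss.length := by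
  cases ss with
  | nil => rfl
  | cons s ss => simp [pvRunMax, pvRunMaxAux_length]

-- element i of the running-max array is ≤ k iff m ≤ k and the break point lies beyond i
theorem pvRunMaxAux_getD_iff (k : Int) (ss : List Int) :
    ∀ (m : Int) (i : Nat), i < ss.length →
      ((pvRunMaxAux m ss).getD i 0 ≤ k ↔ (m ≤ k ∧ i < pvNIdx k ss)) := by
  induction ss with
  | nil => intro m i h; simp at h
  | cons s ss ih =>
    intro m i h
    cases i with
    | zero =>
      simp only [pvRunMaxAux, List.getD_cons_zero, pvNIdx]
      constructor
      · intro hmk; refine ⟨by omega, ?_⟩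
        rw [if_neg (by omega)]; omega
      · rintro ⟨h1, h2⟩
        by_cases hks : k < s
        · rw [if_pos hks] at h2; omega
        · omega
    | succ i =>
      simp only [pvRunMaxAux, List.getD_cons_succ, pvNIdx]
      rw [ih (max m s) i (by simpa using h)]
      by_cases hks : k < s
      · rw [if_pos hks]; constructor
        · rintro ⟨h1, _⟩; omega
        · rintro ⟨_, h2⟩; omega
      · rw [if_neg hks]; constructor
        · rintro ⟨h1, h2⟩; exact ⟨by omega, by omega⟩
        · rintro ⟨h1, h2⟩; exact ⟨by omega, by omega⟩

theorem pvRunMax_getD_iff (k : Int) (ss : List Int) (i : Nat) (h : i < ss.length) :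
    ((pvRunMax ss).getD i 0 ≤ k ↔ i < pvNIdx k ss) := by
  cases ss with
  | nil => simp at h
  | cons s ss =>
    cases i with
    | zero =>
      simp only [pvRunMax, List.getD_cons_zero, pvNIdx]
      split_ifs <;> omega
    | succ i =>
      simp only [pvRunMax, List.getD_cons_succ, pvNIdx]
      rw [pvRunMaxAux_getD_iff k ss s i (by simpa using h)]
      split_ifs <;> omega

-- binary-search correctness: if indices below t satisfy 'a[i] ≤ key' and indices in
-- [t, length) satisfy 'key < a[i]', the search on any bracket [lo, hi] around t finds t
theorem pvBisect_correct (a : List Int) (key : Int) (t : Nat)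
    (hle : ∀ i, i < t → a.getD i 0 ≤ key)
    (hgt : ∀ i, t ≤ i → i < a.length → key < a.getD i 0) :
    ∀ (n lo hi : Nat), hi - lo ≤ n → hi ≤ a.length → lo ≤ t → t ≤ hi →
      pvBisect a key lo hi = t := by
  intro n
  induction n with
  | zero =>
    intro lo hi h1 _ h3 h4
    rw [pvBisect, dif_neg (by omega)]; omega
  | succ n ih =>
    intro lo hi h1 h2 h3 h4
    rw [pvBisect]
    by_cases hlh : lo < hi
    · rw [dif_pos hlh]
      simp only
      by_cases hk : key < a.getD ((lo + hi) / 2) 0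
      · rw [if_pos hk]
        have hmt : t ≤ (lo + hi) / 2 := by
          by_contra hc
          exact absurd (hle ((lo + hi) / 2) (by omega)) (by omega)
        exact ih lo ((lo + hi) / 2) (by omega) (by omega) h3 hmt
      · rw [if_neg hk]
        have hmt : (lo + hi) / 2 < t := by
          by_contra hc
          exact absurd (hgt ((lo + hi) / 2) (by omega) (by omega)) (by omega)
        exact ih ((lo + hi) / 2 + 1) hi (by omega) h2 (by omega) h4
    · rw [dif_neg hlh]; omega

-- ===== VERDICT (by name: the statement is the Claim_ definition above) =====
theorem compute_reduction_spec : Claim_equal_compute_reduction := by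
  intro diffs k x _ _
  unfold Spec_compute_reduction compute_reduction compute_reduction_alt
  rw [pvLoopA_eq]
  simp only
  set sums := pvAccum (diffs.map fun d => consume_quota d x) 0 with hs
  have hlen : (pvRunMax sums).length = sums.length := pvRunMax_length sums
  have ht : pvNIdx k sums ≤ sums.length := pvNIdx_le_length k sums
  rw [pvBisect_correct (pvRunMax sums) k (pvNIdx k sums)
    (fun i hi => (pvRunMax_getD_iff k sums i (by omega)).2 hi)
    (fun i h1 h2 => by
      have := (pvRunMax_getD_iff k sums i (by omega))
      omega)
    (pvRunMax sums).length 0 (pvRunMax sums).length (by omega) (by omega) (by omega) (by omega)]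
  ring
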